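-- pv_equiv track=rewrite | github.com/harishkumarn/Fun-Project-Snippets | c_c++/sumq.py | sumq
-- ===== SOURCE A (Python) =====
-- def sumq(a,b,c):
--     ret=0
--     for i in a:
--         for j  in  b:
--             if i <=  j:
--                 for k in c:
--                     if j >= k:
--                         ret+=((i+j)*(j+k))
--     return  ret
-- ===== SOURCE B (Python) =====
-- def sumq(a, b, c):
--     # Factor the inner double sum per j:
--     #   sum_{i<=j} sum_{k<=j} (i+j)(j+k) = (Sa + Na*j) * (Nc*j + Sc)
--     ret = 0
--     for j in b:
--         na = sa = 0
--         for i in a: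
--             if i <= j:
--                 na += 1
--                 sa += i
--         nc = sc = 0
--         for k in c:
--             if k <= j:
--                 nc += 1
--                 sc += k
--         ret += (sa + na * j) * (nc * j + sc)
--     return ret
-- ===== Notes on version B (the rewrite author's own statement) =====
-- stated objective: faster
-- what changed: Replaces the triple nested loop by a per-j factorization: the double sum over (i,k) factors into (Sa+Na*j)*(Nc*j+Sc) computed from one pass over a and one over c per element of b.
import Mathlib
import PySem

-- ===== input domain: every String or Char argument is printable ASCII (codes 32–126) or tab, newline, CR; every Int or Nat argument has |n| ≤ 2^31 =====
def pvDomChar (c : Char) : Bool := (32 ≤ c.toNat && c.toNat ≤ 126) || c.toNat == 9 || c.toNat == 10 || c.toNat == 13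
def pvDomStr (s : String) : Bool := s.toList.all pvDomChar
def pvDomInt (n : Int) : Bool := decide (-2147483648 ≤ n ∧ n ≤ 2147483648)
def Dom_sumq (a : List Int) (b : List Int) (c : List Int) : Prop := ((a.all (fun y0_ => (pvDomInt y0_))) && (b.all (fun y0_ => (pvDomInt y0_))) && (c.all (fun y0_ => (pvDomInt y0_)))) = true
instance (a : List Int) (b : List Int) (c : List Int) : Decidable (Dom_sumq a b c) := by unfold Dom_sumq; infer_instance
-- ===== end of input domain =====

-- B replaces A's triple nested loop by a per-j factorization of the double sum
-- over (i,k) into a product of two single-pass sums (objective: faster).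

-- ===== PORT A =====
def sumq (a : List Int) (b : List Int) (c : List Int) : Int :=
  a.foldl (fun ret i =>
    b.foldl (fun ret j =>
      if i ≤ j then
        c.foldl (fun ret k => if j ≥ k then ret + (i + j) * (j + k) else ret) ret
      else ret) ret) 0

-- ===== PORT B =====
def sumq_alt (a : List Int) (b : List Int) (c : List Int) : Int :=
  b.foldl (fun ret j =>
    let p := a.foldl (fun (p : Int × Int) i => if i ≤ j then (p.1 + 1, p.2 + i) else p) (0, 0)
    let q := c.foldl (fun (q : Int × Int) k => if k ≤ j then (q.1 + 1, q.2 + k) else q) (0, 0)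
    ret + (p.2 + p.1 * j) * (q.1 * j + q.2)) 0

-- ===== PRECONDITION & SPEC =====
def Spec_sumq (a : List Int) (b : List Int) (c : List Int) (out : Int) : Prop := out = sumq_alt a b c
instance (a : List Int) (b : List Int) (c : List Int) (out : Int) : Decidable (Spec_sumq a b c out) := by unfold Spec_sumq; infer_instance

-- ===== CLAIM (what is proved, stated in full; the proofs are below) =====
def Claim_equal_sumq : Prop := ∀ (a : List Int) (b : List Int) (c : List Int), Dom_sumq a b c → Spec_sumq a b c (sumq a b c)

-- ===== LEMMAS AND PROOFS =====

/-- Σ over the list of (i+j) restricted to i ≤ j. -/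
def S1 (a : List Int) (j : Int) : Int := (a.map (fun i => if i ≤ j then i + j else 0)).sum

/-- Σ over the list of (j+k) restricted to k ≤ j. -/
def S2 (c : List Int) (j : Int) : Int := (c.map (fun k => if k ≤ j then j + k else 0)).sum

lemma inner_c (c : List Int) (i j acc : Int) :
    c.foldl (fun ret k => if j ≥ k then ret + (i + j) * (j + k) else ret) acc
      = acc + (i + j) * S2 c j := by
  induction c generalizing acc with
  | nil => simp [S2]
  | cons k c ih =>
    simp only [List.foldl_cons, ge_iff_le, S2, List.map_cons, List.sum_cons]
    by_cases h : k ≤ j <;> simp [h, ih, S2] <;> ring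

lemma middle_b (b c : List Int) (i acc : Int) :
    b.foldl (fun ret j =>
      if i ≤ j then
        c.foldl (fun ret k => if j ≥ k then ret + (i + j) * (j + k) else ret) ret
      else ret) acc
      = acc + (b.map (fun j => (if i ≤ j then i + j else 0) * S2 c j)).sum := by
  induction b generalizing acc with
  | nil => simp
  | cons j b ih =>
    simp only [List.foldl_cons, List.map_cons, List.sum_cons]
    by_cases h : i ≤ j
    · rw [if_pos h, inner_c, ih, if_pos h]; ring
    · rw [if_neg h, ih, if_neg h]; ring

lemma sumq_eq_sum (a b c : List Int) :
    sumq a b c = (a.map (fun i => (b.map (fun j => (if i ≤ j then i + j else 0) * S2 c j)).sum)).sum := by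
  unfold sumq
  suffices h : ∀ acc : Int, a.foldl (fun ret i =>
      b.foldl (fun ret j =>
        if i ≤ j then
          c.foldl (fun ret k => if j ≥ k then ret + (i + j) * (j + k) else ret) ret
        else ret) ret) acc
      = acc + (a.map (fun i => (b.map (fun j => (if i ≤ j then i + j else 0) * S2 c j)).sum)).sum by
    simpa using h 0
  intro acc
  induction a generalizing acc with
  | nil => simp
  | cons i a ih =>
    simp only [List.foldl_cons, List.map_cons, List.sum_cons]
    rw [middle_b, ih]; ring

lemma pair_a (a : List Int) (j : Int) (p : Int × Int) :
    (a.foldl (fun (p : Int × Int) i => if i ≤ j then (p.1 + 1, p.2 + i) else p) p).2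
      + (a.foldl (fun (p : Int × Int) i => if i ≤ j then (p.1 + 1, p.2 + i) else p) p).1 * j
      = p.2 + p.1 * j + S1 a j := by
  induction a generalizing p with
  | nil => simp [S1]
  | cons i a ih =>
    simp only [List.foldl_cons, S1, List.map_cons, List.sum_cons]
    by_cases h : i ≤ j <;> simp [h, ih, S1] <;> ring

lemma pair_c (c : List Int) (j : Int) (q : Int × Int) :
    (c.foldl (fun (q : Int × Int) k => if k ≤ j then (q.1 + 1, q.2 + k) else q) q).1 * j
      + (c.foldl (fun (q : Int × Int) k => if k ≤ j then (q.1 + 1, q.2 + k) else q) q).2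
      = q.1 * j + q.2 + S2 c j := by
  induction c generalizing q with
  | nil => simp [S2]
  | cons k c ih =>
    simp only [List.foldl_cons, S2, List.map_cons, List.sum_cons]
    by_cases h : k ≤ j <;> simp [h, ih, S2] <;> ring

lemma sumq_alt_eq_sum (a b c : List Int) :
    sumq_alt a b c = (b.map (fun j => S1 a j * S2 c j)).sum := by
  unfold sumq_alt
  suffices h : ∀ acc : Int, b.foldl (fun ret j =>
      let p := a.foldl (fun (p : Int × Int) i => if i ≤ j then (p.1 + 1, p.2 + i) else p) (0, 0)
      let q := c.foldl (fun (q : Int × Int) k => if k ≤ j then (q.1 + 1, q.2 + k) else q) (0, 0)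
      ret + (p.2 + p.1 * j) * (q.1 * j + q.2)) acc
      = acc + (b.map (fun j => S1 a j * S2 c j)).sum by
    simpa using h 0
  intro acc
  induction b generalizing acc with
  | nil => simp
  | cons j b ih =>
    simp only [List.foldl_cons, List.map_cons, List.sum_cons, ih]
    have ha := pair_a a j (0, 0)
    have hc := pair_c c j (0, 0)
    simp only at ha hc
    rw [show (0 : Int) + 0 * j + S1 a j = S1 a j by ring] at ha
    rw [show (0 : Int) * j + 0 + S2 c j = S2 c j by ring] at hc
    rw [ha, hc]; ring

lemma sum_map_add (b : List Int) (f g : Int → Int) :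
    (b.map (fun j => f j + g j)).sum = (b.map f).sum + (b.map g).sum := by
  induction b with
  | nil => simp
  | cons j b ih => simp only [List.map_cons, List.sum_cons, ih]; ring

lemma sum_swap (a b : List Int) (h : Int → Int → Int) :
    (a.map (fun i => (b.map (fun j => h i j)).sum)).sum
      = (b.map (fun j => (a.map (fun i => h i j)).sum)).sum := by
  induction a with
  | nil => simp [List.sum_eq_zero]
  | cons i a ih =>
    simp only [List.map_cons, List.sum_cons, ih, sum_map_add]

lemma inner_factor (a : List Int) (j s : Int) :
    (a.map (fun i => (if i ≤ j then i + j else 0) * s)).sum = S1 a j * s := by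
  induction a with
  | nil => simp [S1]
  | cons i a ih =>
    simp only [List.map_cons, List.sum_cons, ih, S1]
    rw [add_mul]

-- ===== VERDICT (by name: the statement is the Claim_ definition above) =====
theorem sumq_spec : Claim_equal_sumq := by
  intro a b c _
  show sumq a b c = sumq_alt a b c
  rw [sumq_eq_sum, sumq_alt_eq_sum,
    sum_swap a b (fun i j => (if i ≤ j then i + j else 0) * S2 c j)]
  exact congrArg List.sum (List.map_congr_left (fun j _ => inner_factor a j (S2 c j)))
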